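-- pv_equiv track=rewrite | github.com/limkeunhyeok/daily-coding | 백준/1032/solution.py | solution
-- ===== SOURCE A (Python) =====
-- def solution(files):
--     pattern = list(files.pop(0))
--     for i in range(len(files)):
--         for j in range(len(pattern)):
--             if pattern[j] == files[i][j]:
--                 continue
--             else:
--                 pattern[j] = '?'
--     answer = ''.join(pattern)
--     return answer
-- ===== SOURCE B (Python) =====
-- def solution(files):
--     first = files.pop(0)
--     n = len(first)
--     lo = list(first)
--     hi = list(first)
--     for f in files:
--         for j in range(n):
--             d = f[j]
--             if d < lo[j]:
--                 lo[j] = d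
--             if d > hi[j]:
--                 hi[j] = d
--     return ''.join(c if a == b else '?' for c, a, b in zip(first, lo, hi))
-- ===== Notes on version B (the rewrite author's own statement) =====
-- stated objective: alternative
-- what changed: Replaces A's absorbing-'?' pattern accumulator (each file overwrites mismatching positions with '?') by per-column running minimum and maximum characters; a column is uniform iff its min equals its max, in which case the first file's character is emitted, else '?'.
import Mathlib
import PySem

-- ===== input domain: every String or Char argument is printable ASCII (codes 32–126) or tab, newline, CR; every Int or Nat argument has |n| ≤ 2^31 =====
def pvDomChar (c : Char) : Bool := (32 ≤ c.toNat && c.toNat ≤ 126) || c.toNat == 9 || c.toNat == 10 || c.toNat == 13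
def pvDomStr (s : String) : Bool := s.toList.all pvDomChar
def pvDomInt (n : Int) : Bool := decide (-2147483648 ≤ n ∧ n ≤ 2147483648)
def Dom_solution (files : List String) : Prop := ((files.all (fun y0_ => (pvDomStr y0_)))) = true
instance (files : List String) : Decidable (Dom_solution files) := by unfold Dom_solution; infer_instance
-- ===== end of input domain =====

-- B replaces A's absorbing-'?' pattern accumulator by per-column running min/max characters
-- (a column is uniform iff its min equals its max); alternative algorithm, same cost.
-- Both A and B pop files[0] (same in-place mutation); equivalence here is about the return value.


-- ===== PORT A =====
-- inner loop body: if pattern[j] == files[i][j] then continue else pattern[j] = '?'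
-- (index reads use getD ' '; under Pre_solution every index is in range, matching Python, which raises otherwise)
def solUpdA (f : List Char) (pat : List Char) (j : Nat) : List Char :=
  if pat.getD j ' ' == f.getD j ' ' then pat else pat.set j '?'

-- one iteration of the outer loop: for j in range(len(pattern)): …
def solStepA (pat : List Char) (f : List Char) : List Char :=
  (List.range pat.length).foldl (solUpdA f) pat

def solution (files : List String) : String :=
  match files with
  | [] => ""  -- Python: files.pop(0) raises IndexError; excluded by Pre_solution
  | first :: rest =>
    String.mk ((rest.map String.toList).foldl solStepA first.toList)

-- ===== PORT B =====
-- inner loop body: d = f[j]; if d < lo[j]: lo[j] = d; if d > hi[j]: hi[j] = d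
def solUpdB (f : List Char) (st : List Char × List Char) (j : Nat) : List Char × List Char :=
  let d := f.getD j ' '
  let lo := if d < st.1.getD j ' ' then st.1.set j d else st.1
  let hi := if st.2.getD j ' ' < d then st.2.set j d else st.2
  (lo, hi)

-- one iteration of the outer loop: for j in range(n): …
def solStepB (n : Nat) (st : List Char × List Char) (f : List Char) : List Char × List Char :=
  (List.range n).foldl (solUpdB f) st

def solution_alt (files : List String) : String :=
  match files with
  | [] => ""  -- Python: files.pop(0) raises IndexError; excluded by Pre_solution
  | first :: rest =>
    let n := first.length
    let st := (rest.map String.toList).foldl (solStepB n) (first.toList, first.toList)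
    String.mk ((first.toList.zip (st.1.zip st.2)).map
      (fun x => if x.2.1 == x.2.2 then x.1 else '?'))

-- ===== PRECONDITION & SPEC =====
-- Pre_ excludes exactly the inputs where Python A raises IndexError: the empty list
-- (files.pop(0)) and lists where a later file is shorter than the first (files[i][j]).
def Pre_solution (files : List String) : Prop :=
  files ≠ [] ∧ ∀ f ∈ files, (files.headD "").length ≤ f.length
instance (files : List String) : Decidable (Pre_solution files) := by unfold Pre_solution; infer_instance
def pvWitness_solution : List String := ["config.sys", "confNg.sNs"]

def Spec_solution (files : List String) (out : String) : Prop := out = solution_alt files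
instance (files : List String) (out : String) : Decidable (Spec_solution files out) := by unfold Spec_solution; infer_instance

-- ===== CLAIM (what is proved, stated in full; the proofs are below) =====
def Claim_equal_solution : Prop := ∀ (files : List String), Dom_solution files → Pre_solution files → Spec_solution files (solution files)

-- ===== LEMMAS AND PROOFS =====

-- ---- A side: the fold yields first[j] if every file agrees at j, else '?' ----

theorem solUpdA_length (f pat : List Char) (j : Nat) : (solUpdA f pat j).length = pat.length := by
  unfold solUpdA; split <;> simp

theorem foldl_solUpdA_length (f : List Char) (l : List Nat) (pat : List Char) :
    (l.foldl (solUpdA f) pat).length = pat.length := by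
  induction l generalizing pat with
  | nil => rfl
  | cons a l ih => simp [List.foldl, ih, solUpdA_length]

theorem solUpdA_getD (f pat : List Char) (a j : Nat) (hj : j < pat.length) :
    (solUpdA f pat a).getD j ' ' =
      if j = a then (if pat.getD j ' ' == f.getD j ' ' then pat.getD j ' ' else '?')
      else pat.getD j ' ' := by
  unfold solUpdA
  simp only [List.getD_eq_getElem?_getD, beq_iff_eq]
  rcases eq_or_ne j a with rfl | hne
  · by_cases h : pat[j]?.getD ' ' = f[j]?.getD ' '
    · simp [h]
    · simp [h, List.getElem?_set_self hj]
  · by_cases h : pat[a]?.getD ' ' = f[a]?.getD ' '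
    · simp [h]
      intro h2; exact absurd h2 hne
    · simp [h, List.getElem?_set_ne (Ne.symm hne)]
      intro h2; exact absurd h2 hne

theorem foldl_solUpdA_getD (f : List Char) (l : List Nat) (pat : List Char) (j : Nat)
    (hj : j < pat.length) :
    (l.foldl (solUpdA f) pat).getD j ' ' =
      if j ∈ l then (if pat.getD j ' ' == f.getD j ' ' then pat.getD j ' ' else '?')
      else pat.getD j ' ' := by
  induction l generalizing pat with
  | nil => simp
  | cons a l ih =>
    simp only [List.foldl_cons]
    rw [ih (solUpdA f pat a) (by rw [solUpdA_length]; exact hj),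
        solUpdA_getD f pat a j hj]
    rcases eq_or_ne j a with rfl | hne
    · by_cases hm : j ∈ l <;> by_cases hq : pat.getD j ' ' == f.getD j ' ' <;>
        simp [hm] <;> intro h <;> simp_all
    · simp [hne, List.mem_cons]

theorem solStepA_length (pat f : List Char) : (solStepA pat f).length = pat.length := by
  unfold solStepA; exact foldl_solUpdA_length f _ pat

theorem solStepA_getD (pat f : List Char) (j : Nat) (hj : j < pat.length) :
    (solStepA pat f).getD j ' ' =
      if pat.getD j ' ' == f.getD j ' ' then pat.getD j ' ' else '?' := by
  unfold solStepA
  rw [foldl_solUpdA_getD f _ pat j hj]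
  simp [List.mem_range, hj]

theorem foldl_solStepA_length (fs : List (List Char)) (pat : List Char) :
    (fs.foldl solStepA pat).length = pat.length := by
  induction fs generalizing pat with
  | nil => rfl
  | cons f fs ih => simp [List.foldl, ih, solStepA_length]

-- core A invariant: '?' is absorbing, so the uniform formula is correct.
theorem foldl_solStepA_getD (fs : List (List Char)) (pat : List Char) (j : Nat)
    (hj : j < pat.length) :
    (fs.foldl solStepA pat).getD j ' ' =
      if fs.all (fun f => f.getD j ' ' == pat.getD j ' ') then pat.getD j ' ' else '?' := by
  induction fs generalizing pat with
  | nil => simp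
  | cons f fs ih =>
    simp only [List.foldl_cons]
    rw [ih (solStepA pat f) (by rw [solStepA_length]; exact hj), solStepA_getD pat f j hj]
    by_cases hq : pat[j]?.getD ' ' = f[j]?.getD ' '
    · simp [List.getD_eq_getElem?_getD, hq, beq_iff_eq]
    · have h1 : ¬ f[j]?.getD ' ' = pat[j]?.getD ' ' := fun h => hq h.symm
      simp [List.getD_eq_getElem?_getD, beq_iff_eq, hq, h1]

-- ---- B side: the pair fold is a pair of independent update-at-j folds ----

def updMin (f lo : List Char) (j : Nat) : List Char :=
  if f.getD j ' ' < lo.getD j ' ' then lo.set j (f.getD j ' ') else lo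

def updMax (f hi : List Char) (j : Nat) : List Char :=
  if hi.getD j ' ' < f.getD j ' ' then hi.set j (f.getD j ' ') else hi

theorem solUpdB_eta (f : List Char) (st : List Char × List Char) (j : Nat) :
    solUpdB f st j = (updMin f st.1 j, updMax f st.2 j) := rfl

theorem foldl_solUpdB (f : List Char) (l : List Nat) (st : List Char × List Char) :
    l.foldl (solUpdB f) st = (l.foldl (updMin f) st.1, l.foldl (updMax f) st.2) := by
  induction l generalizing st with
  | nil => rfl
  | cons a l ih => simp [List.foldl, ih, solUpdB_eta]

theorem updMin_length (f lo : List Char) (j : Nat) : (updMin f lo j).length = lo.length := by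
  unfold updMin; split <;> simp

theorem updMax_length (f hi : List Char) (j : Nat) : (updMax f hi j).length = hi.length := by
  unfold updMax; split <;> simp

theorem foldl_updMin_length (f : List Char) (l : List Nat) (lo : List Char) :
    (l.foldl (updMin f) lo).length = lo.length := by
  induction l generalizing lo with
  | nil => rfl
  | cons a l ih => simp [List.foldl, ih, updMin_length]

theorem foldl_updMax_length (f : List Char) (l : List Nat) (hi : List Char) :
    (l.foldl (updMax f) hi).length = hi.length := by
  induction l generalizing hi with
  | nil => rfl
  | cons a l ih => simp [List.foldl, ih, updMax_length]

theorem min_absorb (d x : Char) :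
    (if d < (if d < x then d else x) then d else (if d < x then d else x)) =
      (if d < x then d else x) := by
  by_cases h : d < x
  · simp [h, lt_irrefl]
  · simp [h]

theorem max_absorb (d x : Char) :
    (if (if x < d then d else x) < d then d else (if x < d then d else x)) =
      (if x < d then d else x) := by
  by_cases h : x < d
  · simp [h, lt_irrefl]
  · simp [h]

theorem updMin_getD (f lo : List Char) (a j : Nat) (hj : j < lo.length) :
    (updMin f lo a).getD j ' ' =
      if j = a then (if f.getD j ' ' < lo.getD j ' ' then f.getD j ' ' else lo.getD j ' ')
      else lo.getD j ' ' := by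
  unfold updMin
  simp only [List.getD_eq_getElem?_getD]
  rcases eq_or_ne j a with rfl | hne
  · by_cases h : f[j]?.getD ' ' < lo[j]?.getD ' '
    · simp [h, List.getElem?_set_self hj]
    · simp [h]
  · by_cases h : f[a]?.getD ' ' < lo[a]?.getD ' '
    · simp [h, List.getElem?_set_ne (Ne.symm hne), hne]
    · simp [h, hne]

theorem updMax_getD (f hi : List Char) (a j : Nat) (hj : j < hi.length) :
    (updMax f hi a).getD j ' ' =
      if j = a then (if hi.getD j ' ' < f.getD j ' ' then f.getD j ' ' else hi.getD j ' ')
      else hi.getD j ' ' := by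
  unfold updMax
  simp only [List.getD_eq_getElem?_getD]
  rcases eq_or_ne j a with rfl | hne
  · by_cases h : hi[j]?.getD ' ' < f[j]?.getD ' '
    · simp [h, List.getElem?_set_self hj]
    · simp [h]
  · by_cases h : hi[a]?.getD ' ' < f[a]?.getD ' '
    · simp [h, List.getElem?_set_ne (Ne.symm hne), hne]
    · simp [h, hne]

theorem foldl_updMin_getD (f : List Char) (l : List Nat) (lo : List Char) (j : Nat)
    (hj : j < lo.length) :
    (l.foldl (updMin f) lo).getD j ' ' =
      if j ∈ l then (if f.getD j ' ' < lo.getD j ' ' then f.getD j ' ' else lo.getD j ' ')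
      else lo.getD j ' ' := by
  induction l generalizing lo with
  | nil => simp
  | cons a l ih =>
    simp only [List.foldl_cons]
    rw [ih (updMin f lo a) (by rw [updMin_length]; exact hj), updMin_getD f lo a j hj]
    rcases eq_or_ne j a with rfl | hne
    · simp only [if_pos rfl, List.mem_cons, true_or, if_true]
      by_cases hm : j ∈ l
      · rw [if_pos hm, min_absorb]
      · rw [if_neg hm]
    · simp only [if_neg hne, List.mem_cons]
      by_cases hm : j ∈ l
      · rw [if_pos hm, if_pos (Or.inr hm)]
      · rw [if_neg hm, if_neg (by rintro (h | h) <;> [exact hne h; exact hm h])]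

theorem foldl_updMax_getD (f : List Char) (l : List Nat) (hi : List Char) (j : Nat)
    (hj : j < hi.length) :
    (l.foldl (updMax f) hi).getD j ' ' =
      if j ∈ l then (if hi.getD j ' ' < f.getD j ' ' then f.getD j ' ' else hi.getD j ' ')
      else hi.getD j ' ' := by
  induction l generalizing hi with
  | nil => simp
  | cons a l ih =>
    simp only [List.foldl_cons]
    rw [ih (updMax f hi a) (by rw [updMax_length]; exact hj), updMax_getD f hi a j hj]
    rcases eq_or_ne j a with rfl | hne
    · simp only [if_pos rfl, List.mem_cons, true_or, if_true]
      by_cases hm : j ∈ l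
      · rw [if_pos hm, max_absorb]
      · rw [if_neg hm]
    · simp only [if_neg hne, List.mem_cons]
      by_cases hm : j ∈ l
      · rw [if_pos hm, if_pos (Or.inr hm)]
      · rw [if_neg hm, if_neg (by rintro (h | h) <;> [exact hne h; exact hm h])]

-- outer fold: per-column running minimum and maximum
theorem foldl_solStepB_getD (fs : List (List Char)) (n : Nat) (st : List Char × List Char)
    (hl1 : st.1.length = n) (hl2 : st.2.length = n) (j : Nat) (hj : j < n) :
    (fs.foldl (solStepB n) st).1.getD j ' ' =
        fs.foldl (fun a f => if f.getD j ' ' < a then f.getD j ' ' else a) (st.1.getD j ' ') ∧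
    (fs.foldl (solStepB n) st).2.getD j ' ' =
        fs.foldl (fun a f => if a < f.getD j ' ' then f.getD j ' ' else a) (st.2.getD j ' ') := by
  induction fs generalizing st with
  | nil => exact ⟨rfl, rfl⟩
  | cons f fs ih =>
    simp only [List.foldl_cons]
    have hst : solStepB n st f =
        ((List.range n).foldl (updMin f) st.1, (List.range n).foldl (updMax f) st.2) := by
      unfold solStepB; exact foldl_solUpdB f _ st
    have h1 : ((List.range n).foldl (updMin f) st.1).length = n := by
      rw [foldl_updMin_length]; exact hl1
    have h2 : ((List.range n).foldl (updMax f) st.2).length = n := by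
      rw [foldl_updMax_length]; exact hl2
    obtain ⟨ihl, ihr⟩ := ih (solStepB n st f) (by rw [hst]; exact h1) (by rw [hst]; exact h2)
    rw [ihl, ihr, hst]
    constructor
    · congr 1
      rw [foldl_updMin_getD f _ st.1 j (hl1 ▸ hj)]
      simp [List.mem_range, hj]
    · congr 1
      rw [foldl_updMax_getD f _ st.2 j (hl2 ▸ hj)]
      simp [List.mem_range, hj]

theorem foldl_solStepB_length (fs : List (List Char)) (n : Nat) (st : List Char × List Char) :
    (fs.foldl (solStepB n) st).1.length = st.1.length ∧
    (fs.foldl (solStepB n) st).2.length = st.2.length := by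
  induction fs generalizing st with
  | nil => exact ⟨rfl, rfl⟩
  | cons f fs ih =>
    simp only [List.foldl_cons]
    obtain ⟨h1, h2⟩ := ih (solStepB n st f)
    have hst : solStepB n st f =
        ((List.range n).foldl (updMin f) st.1, (List.range n).foldl (updMax f) st.2) := by
      unfold solStepB; exact foldl_solUpdB f _ st
    rw [h1, h2, hst]
    exact ⟨foldl_updMin_length _ _ _, foldl_updMax_length _ _ _⟩

-- ---- min-fold = max-fold ↔ every element equals the seed ----

theorem fmin_le (a : Char) (cs : List Char) :
    cs.foldl (fun x c => if c < x then c else x) a ≤ a ∧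
    ∀ c ∈ cs, cs.foldl (fun x c => if c < x then c else x) a ≤ c := by
  induction cs generalizing a with
  | nil => simp
  | cons c cs ih =>
    simp only [List.foldl_cons]
    obtain ⟨h1, h2⟩ := ih (if c < a then c else a)
    have hca : (if c < a then c else a) ≤ a := by split <;> [exact le_of_lt ‹_›; rfl]
    have hcc : (if c < a then c else a) ≤ c := by split <;> [rfl; exact le_of_not_gt ‹_›]
    exact ⟨le_trans h1 hca, by
      intro d hd
      rcases List.mem_cons.mp hd with rfl | hd
      · exact le_trans h1 hcc
      · exact h2 d hd⟩

theorem fmax_ge (a : Char) (cs : List Char) :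
    a ≤ cs.foldl (fun x c => if x < c then c else x) a ∧
    ∀ c ∈ cs, c ≤ cs.foldl (fun x c => if x < c then c else x) a := by
  induction cs generalizing a with
  | nil => simp
  | cons c cs ih =>
    simp only [List.foldl_cons]
    obtain ⟨h1, h2⟩ := ih (if a < c then c else a)
    have hca : a ≤ (if a < c then c else a) := by split <;> [exact le_of_lt ‹_›; rfl]
    have hcc : c ≤ (if a < c then c else a) := by split <;> [rfl; exact le_of_not_gt ‹_›]
    exact ⟨le_trans hca h1, by
      intro d hd
      rcases List.mem_cons.mp hd with rfl | hd
      · exact le_trans hcc h1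
      · exact h2 d hd⟩

theorem minmax_eq_iff (a : Char) (cs : List Char) :
    (cs.foldl (fun x c => if c < x then c else x) a =
     cs.foldl (fun x c => if x < c then c else x) a) ↔ ∀ c ∈ cs, c = a := by
  constructor
  · intro h c hc
    obtain ⟨hm1, hm2⟩ := fmin_le a cs
    obtain ⟨hx1, hx2⟩ := fmax_ge a cs
    have hac : a = cs.foldl (fun x c => if c < x then c else x) a :=
      le_antisymm (h ▸ hx1) hm1
    exact le_antisymm (hac ▸ h ▸ hx2 c hc) (hac ▸ hm2 c hc)
  · intro h
    induction cs generalizing a with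
    | nil => rfl
    | cons c cs ih =>
      have hc : c = a := h c (List.mem_cons_self ..)
      subst hc
      simp only [List.foldl_cons, lt_irrefl, if_neg (lt_irrefl c)]
      exact ih c (fun d hd => h d (List.mem_cons_of_mem _ hd))

-- ---- assembly ----

theorem core_eq (p : List Char) (fs : List (List Char)) :
    fs.foldl solStepA p =
    (p.zip ((fs.foldl (solStepB p.length) (p, p)).1.zip (fs.foldl (solStepB p.length) (p, p)).2)).map
      (fun x => if x.2.1 == x.2.2 then x.1 else '?') := by
  have hlen := foldl_solStepB_length fs p.length (p, p)
  apply List.ext_getElem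
  · simp [foldl_solStepA_length, hlen.1, hlen.2]
  · intro j h1 h2
    have hj : j < p.length := by simpa [foldl_solStepA_length] using h1
    have hL : (fs.foldl solStepA p)[j] = (fs.foldl solStepA p).getD j ' ' := by
      rw [List.getD_eq_getElem?_getD, List.getElem?_eq_getElem h1]; rfl
    rw [hL, foldl_solStepA_getD fs p j hj]
    have hj1 : j < (fs.foldl (solStepB p.length) (p, p)).1.length := by rw [hlen.1]; exact hj
    have hj2 : j < (fs.foldl (solStepB p.length) (p, p)).2.length := by rw [hlen.2]; exact hj
    have hg1 : (fs.foldl (solStepB p.length) (p, p)).1.getD j ' ' =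
        (fs.foldl (solStepB p.length) (p, p)).1[j] := by
      rw [List.getD_eq_getElem?_getD, List.getElem?_eq_getElem hj1]; rfl
    have hg2 : (fs.foldl (solStepB p.length) (p, p)).2.getD j ' ' =
        (fs.foldl (solStepB p.length) (p, p)).2[j] := by
      rw [List.getD_eq_getElem?_getD, List.getElem?_eq_getElem hj2]; rfl
    obtain ⟨hmin, hmax⟩ := foldl_solStepB_getD fs p.length (p, p) rfl rfl j hj
    have hp0 : (p : List Char).getD j ' ' = p[j] := by
      rw [List.getD_eq_getElem?_getD, List.getElem?_eq_getElem hj]; rfl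
    rw [List.getElem_map, List.getElem_zip, List.getElem_zip]
    have hfold1 : (fs.foldl (solStepB p.length) (p, p)).1.getD j ' ' =
        (fs.map (fun f => f.getD j ' ')).foldl (fun x c => if c < x then c else x) (p.getD j ' ') := by
      rw [hmin, List.foldl_map]
    have hfold2 : (fs.foldl (solStepB p.length) (p, p)).2.getD j ' ' =
        (fs.map (fun f => f.getD j ' ')).foldl (fun x c => if x < c then c else x) (p.getD j ' ') := by
      rw [hmax, List.foldl_map]
    by_cases hall : ∀ c ∈ fs.map (fun f => f.getD j ' '), c = p.getD j ' '
    · have heq : (fs.foldl (solStepB p.length) (p, p)).1.getD j ' ' =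
          (fs.foldl (solStepB p.length) (p, p)).2.getD j ' ' := by
        rw [hfold1, hfold2, (minmax_eq_iff _ _).mpr hall]
      have hallb : fs.all (fun f => f.getD j ' ' == p.getD j ' ') = true := by
        simp only [List.all_eq_true, beq_iff_eq]
        intro f hf
        exact hall _ (List.mem_map_of_mem hf)
      rw [← hg1, ← hg2, heq, if_pos hallb, if_pos (beq_self_eq_true _), hp0]
    · have hne : (fs.foldl (solStepB p.length) (p, p)).1.getD j ' ' ≠
          (fs.foldl (solStepB p.length) (p, p)).2.getD j ' ' := by
        rw [hfold1, hfold2]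
        intro h
        exact hall ((minmax_eq_iff _ _).mp h)
      have hallb : fs.all (fun f => f.getD j ' ' == p.getD j ' ') = false := by
        simp only [List.all_eq_false]
        push_neg at hall
        obtain ⟨c, hc, hcne⟩ := hall
        obtain ⟨f, hf, rfl⟩ := List.mem_map.mp hc
        exact ⟨f, hf, by simpa using hcne⟩
      rw [hg1, hg2] at hne
      rw [if_neg (by rw [hallb]; simp), if_neg (by simp [hne])]

theorem solution_eq_alt (files : List String) : solution files = solution_alt files := by
  cases files with
  | nil => rfl
  | cons first rest =>
    show String.mk _ = String.mk _
    congr 1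
    have hn : first.length = first.toList.length := by simp
    rw [hn]
    exact core_eq first.toList (rest.map String.toList)

-- ===== VERDICT (by name: the statement is the Claim_ definition above) =====
theorem solution_spec : Claim_equal_solution := by
  intro files _ _
  unfold Spec_solution
  exact solution_eq_alt files
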